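-- pv_equiv track=rewrite | github.com/rafelus/Curso-Udemy---Python-Total | Curso_Python_Udemy/Día 5/03_funciones_dinamicas.py | todos_positivos
-- ===== SOURCE A (Python) =====
-- def todos_positivos(lista):
--     positivos = 0
--     for numero in lista:
--         if numero >=0:
--             positivos += 1
--     if positivos == len(lista):
--         return True
--     else:
--         return False
-- ===== SOURCE B (Python) =====
-- def todos_positivos(lista):
--     return all(n >= 0 for n in lista)
-- ===== Notes on version B (the rewrite author's own statement) =====
-- stated objective: idiomatic
-- what changed: Replaces the count-nonnegatives-then-compare-with-length accumulator scheme by a single short-circuiting universal predicate all(n >= 0 for n in lista).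
import Mathlib
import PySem

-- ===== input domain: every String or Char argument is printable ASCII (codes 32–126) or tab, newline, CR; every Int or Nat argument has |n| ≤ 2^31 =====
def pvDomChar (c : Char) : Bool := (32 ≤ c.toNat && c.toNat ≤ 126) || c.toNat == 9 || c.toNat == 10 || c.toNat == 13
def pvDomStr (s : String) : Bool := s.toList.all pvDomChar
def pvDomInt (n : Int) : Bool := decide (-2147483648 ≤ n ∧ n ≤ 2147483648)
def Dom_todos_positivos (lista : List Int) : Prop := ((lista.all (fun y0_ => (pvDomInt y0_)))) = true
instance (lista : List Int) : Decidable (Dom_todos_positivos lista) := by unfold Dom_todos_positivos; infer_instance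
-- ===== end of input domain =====

-- ===== PORT A =====
-- literal port of A: count nonnegatives with a fold, then compare the count to the length
def todos_positivos (lista : List Int) : Bool :=
  let positivos := lista.foldl (fun positivos numero => if numero ≥ 0 then positivos + 1 else positivos) (0 : Int)
  if positivos == (lista.length : Int) then true else false

-- ===== PORT B =====
-- port of B: all(n >= 0 for n in lista)
def todos_positivos_alt (lista : List Int) : Bool := lista.all (fun n => n ≥ 0)

-- ===== PRECONDITION & SPEC =====
def Spec_todos_positivos (lista : List Int) (out : Bool) : Prop := out = todos_positivos_alt lista
instance (lista : List Int) (out : Bool) : Decidable (Spec_todos_positivos lista out) := by unfold Spec_todos_positivos; infer_instance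

-- ===== CLAIM (what is proved, stated in full; the proofs are below) =====
def Claim_equal_todos_positivos : Prop := ∀ (lista : List Int), Dom_todos_positivos lista → Spec_todos_positivos lista (todos_positivos lista)

-- ===== LEMMAS AND PROOFS =====

-- ===== VERDICT (by name: the statement is the Claim_ definition above) =====
-- loop invariant: the fold starting from c adds the number of nonnegative elements
lemma count_foldl (lista : List Int) (c : Int) :
    lista.foldl (fun positivos numero => if numero ≥ 0 then positivos + 1 else positivos) c
      = c + ((lista.filter (fun n => decide (n ≥ 0))).length : Int) := by
  induction lista generalizing c with
  | nil => simp
  | cons x xs ih =>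
    simp only [List.foldl_cons, List.filter_cons, ih]
    by_cases h : x ≥ 0 <;> simp [h] <;> push_cast <;> ring

lemma filter_len_eq_iff (lista : List Int) :
    (lista.filter (fun n => decide (n ≥ 0))).length = lista.length ↔
      lista.all (fun n => n ≥ 0) = true := by
  rw [List.length_filter_eq_length_iff]
  simp [List.all_eq_true]

theorem todos_positivos_spec : Claim_equal_todos_positivos := by
  intro lista _
  unfold Spec_todos_positivos todos_positivos todos_positivos_alt
  simp only [count_foldl, zero_add, beq_iff_eq]
  by_cases h : lista.all (fun n => n ≥ 0) = true
  · rw [← filter_len_eq_iff] at h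
    simp only [h, if_true]
    rw [filter_len_eq_iff] at h
    simp [List.all_eq_true] at h ⊢
    exact h
  · have h2 : (lista.filter (fun n => decide (n ≥ 0))).length ≠ lista.length := by
      intro hc; exact h ((filter_len_eq_iff lista).mp hc)
    have h3 : ((lista.filter (fun n => decide (n ≥ 0))).length : Int) ≠ (lista.length : Int) := by
      exact_mod_cast h2
    simp only [h3, if_false]
    simp [List.all_eq_true] at h ⊢
    exact h
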